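-- pv_equiv track=rewrite | github.com/chain2008/COSC1100 | Assignment2/base3cipher.py | base3_cipher
-- ===== SOURCE A (Python) =====
-- ASCII_A = 65
--
-- BASE = 3
--
-- LENGTH = 3
--
-- def base3_cipher(letter, key):
--     # Convert the letter to its corresponding ASCII code.
--     ascii_code = ord(letter.upper()) - ASCII_A
--     if ascii_code < 0 or ascii_code > 26:
--         return letter
--     # Convert the ASCII code to base 3 and store digits in a list.
--     digit_list = []
--     while ascii_code > 0:
--         # Get the remainder from dividing the code by 3.
--         remainder = ascii_code % BASE
--         # This remainder becomes the first digit of the numeric value.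
--         digit_list.insert(0, remainder)
--         # Force integer division.
--         ascii_code = ascii_code // BASE
--
--     # Add leading zeros (if necessary) to make it 3 digits long.
--     while len(digit_list) < LENGTH:
--         digit_list.insert(0, 0)
--
--     # Shuffle the first and nth digits by swapping the values in the list.
--     # Note that key is a parameter to this function.
--     hold_value = digit_list[key]
--     digit_list[key] = digit_list[0]
--     digit_list[0] = hold_value
--
--     decimal_value = 0
--     # Now decode from ASCII which will result in an encoded letter.
--     decimal_value = digit_list[0] * \
--         (BASE * BASE) + digit_list[1] * (BASE) + digit_list[2]
--
--     # Return the output as a single letter.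
--     ret = chr(decimal_value + ASCII_A )
--     return ret
-- ===== SOURCE B (Python) =====
-- ASCII_A = 65
--
-- def base3_cipher(letter, key):
--     # Same letter->code computation and guard as the task requires.
--     code = ord(letter.upper()) - ASCII_A
--     if code < 0 or code > 26:
--         return letter
--     # Closed-form base-3 digits (no loops), most significant first.
--     digits = [code // 9, (code // 3) % 3, code % 3]
--     # Python's negative-index rule on a 3-list is exactly key % 3.
--     k = key % 3
--     digits[0], digits[k] = digits[k], digits[0]
--     return chr(digits[0] * 9 + digits[1] * 3 + digits[2] + ASCII_A)
-- ===== Notes on version B (the rewrite author's own statement) =====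
-- stated objective: simpler
-- what changed: Replaces the while-loop base-3 digit extraction and the zero-padding loop with a closed-form three-digit decomposition [code//9, code//3%3, code%3] and replaces Python's negative-index rule with key % 3, keeping the guard/swap/recombination.
-- crash fix: When letter is a single character whose uppercase code is in A..[ (0 <= ord(upper)-65 <= 26) and key is outside -3..2, A raises IndexError on digit_list[key]; B's key % 3 makes it return the swapped letter, e.g. base3_cipher('b', 5) = 'J'. — e.g. on base3_cipher("b", 5): A raises IndexError, B returns "J"
import Mathlib
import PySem

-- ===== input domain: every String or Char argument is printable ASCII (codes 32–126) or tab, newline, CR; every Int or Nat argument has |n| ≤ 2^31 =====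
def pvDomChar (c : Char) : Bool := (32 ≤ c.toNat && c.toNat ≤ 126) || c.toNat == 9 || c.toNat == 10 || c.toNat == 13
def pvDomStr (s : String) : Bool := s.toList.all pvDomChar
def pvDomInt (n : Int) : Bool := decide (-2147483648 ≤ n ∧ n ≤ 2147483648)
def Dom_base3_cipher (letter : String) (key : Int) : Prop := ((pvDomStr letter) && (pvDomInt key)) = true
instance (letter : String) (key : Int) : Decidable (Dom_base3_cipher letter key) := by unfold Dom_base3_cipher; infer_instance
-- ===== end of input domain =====

-- B replaces A's two loops (base-3 extraction + zero padding) by the closed-form digit list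
-- [code//9, code//3%3, code%3] and the negative-index swap by key % 3; objective: simpler.

-- ===== PORT A =====
-- while ascii_code > 0: digit_list.insert(0, ascii_code % 3); ascii_code //= 3
-- (fuel-guarded structural recursion; fuel = initial code.toNat bounds the iteration count,
--  since the loop variable strictly decreases while positive — the guard only ensures totality)
def base3ALoop : Nat → Int → List Int → List Int
  | 0, _, acc => acc
  | fuel + 1, code, acc =>
      if code > 0 then
        base3ALoop fuel (PySem.Int.floordiv code 3) (PySem.Int.mod code 3 :: acc)
      else acc

-- while len(digit_list) < 3: digit_list.insert(0, 0)   (fuel 3 suffices: each step grows the list)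
def base3APad : Nat → List Int → List Int
  | 0, l => l
  | fuel + 1, l => if l.length < 3 then base3APad fuel (0 :: l) else l

-- the body after the guard; fallback is returned exactly where Python raises IndexError (outside Pre_)
def base3ACore (fallback : String) (code key : Int) : String :=
  let dl := base3APad 3 (base3ALoop code.toNat code [])
  match PySem.List.pyGet? dl key with
  | none => fallback
  | some hold =>
      let dl2 := PySem.List.pySetD dl key (PySem.List.pyGetD dl 0 0)
      let dl3 := PySem.List.pySetD dl2 0 hold
      let dec := PySem.List.pyGetD dl3 0 0 * (3 * 3) + PySem.List.pyGetD dl3 1 0 * 3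
                   + PySem.List.pyGetD dl3 2 0
      String.ofList [Char.ofNat (dec + 65).toNat]

def base3_cipher (letter : String) (key : Int) : String :=
  match PySem.Chars.upper letter.toList with
  | [c] =>
      let code : Int := (c.toNat : Int) - 65
      if code < 0 ∨ code > 26 then letter else base3ACore letter code key
  | _ => letter   -- ord(letter.upper()) raises TypeError here (excluded by Pre_)

-- ===== PORT B =====
def base3BCore (code key : Int) : String :=
  let digits : List Int :=
    [PySem.Int.floordiv code 9, PySem.Int.mod (PySem.Int.floordiv code 3) 3, PySem.Int.mod code 3]
  let k : Int := PySem.Int.mod key 3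
  -- digits[0], digits[k] = digits[k], digits[0]  (RHS read first, then assigned left to right)
  let t := PySem.List.pyGetD digits k 0
  let d1 := PySem.List.pySetD digits 0 t
  let d2 := PySem.List.pySetD d1 k (PySem.List.pyGetD digits 0 0)
  String.ofList [Char.ofNat ((PySem.List.pyGetD d2 0 0 * 9 + PySem.List.pyGetD d2 1 0 * 3
                           + PySem.List.pyGetD d2 2 0 + 65)).toNat]

def base3_cipher_alt (letter : String) (key : Int) : String :=
  let u := PySem.Chars.upper letter.toList
  if u.length = 1 then   -- ord(letter.upper()) raises TypeError otherwise (excluded by Pre_)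
    let code : Int := ((u.headD 'A').toNat : Int) - 65
    if code < 0 ∨ code > 26 then letter else base3BCore code key
  else letter

-- ===== PRECONDITION & SPEC =====
-- Pre_ excludes inputs on which A raises: letter not a single character (ord raises TypeError),
-- and single letters with in-range code but key outside -3..2 (digit_list[key] raises IndexError).
def pvLetterHit (letter : String) : Bool :=
  letter.toList.any fun c => 65 ≤ (PySem.Chars.upperChar c).toNat && (PySem.Chars.upperChar c).toNat ≤ 91

def Pre_base3_cipher (letter : String) (key : Int) : Prop :=
  letter.toList.length = 1 ∧
  (pvLetterHit letter = true → (-3 ≤ key ∧ key ≤ 2))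
instance (letter : String) (key : Int) : Decidable (Pre_base3_cipher letter key) := by
  unfold Pre_base3_cipher; infer_instance

def pvWitness_base3_cipher : String × Int := ("b", 1)

-- When letter is a single character with 0 ≤ ord(upper)-65 ≤ 26 and key outside -3..2,
-- A raises IndexError on digit_list[key]; B's key % 3 returns the swapped letter instead.
def Raises_base3_cipher (letter : String) (key : Int) : Prop :=
  letter.toList.length = 1 ∧ pvLetterHit letter = true ∧ (key < -3 ∨ 2 < key)
instance (letter : String) (key : Int) : Decidable (Raises_base3_cipher letter key) := by
  unfold Raises_base3_cipher; infer_instance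

def pvRaiseWitness_base3_cipher : String × Int := ("b", 5)
def pvRaiseWitnessOut_base3_cipher : String := "J"

def Spec_base3_cipher (letter : String) (key : Int) (out : String) : Prop :=
  out = base3_cipher_alt letter key
instance (letter : String) (key : Int) (out : String) : Decidable (Spec_base3_cipher letter key out) := by
  unfold Spec_base3_cipher; infer_instance

-- ===== CLAIM (what is proved, stated in full; the proofs are below) =====
def Claim_equal_base3_cipher : Prop := ∀ (letter : String) (key : Int), Dom_base3_cipher letter key → Pre_base3_cipher letter key → Spec_base3_cipher letter key (base3_cipher letter key)

def Claim_raises_base3_cipher : Prop :=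
  (∀ (letter : String) (key : Int), Dom_base3_cipher letter key → Raises_base3_cipher letter key → ¬ Pre_base3_cipher letter key) ∧
  (Dom_base3_cipher (pvRaiseWitness_base3_cipher.1) (pvRaiseWitness_base3_cipher.2) ∧
   Raises_base3_cipher (pvRaiseWitness_base3_cipher.1) (pvRaiseWitness_base3_cipher.2) ∧
   base3_cipher_alt (pvRaiseWitness_base3_cipher.1) (pvRaiseWitness_base3_cipher.2) = pvRaiseWitnessOut_base3_cipher)

-- ===== LEMMAS AND PROOFS =====

set_option maxRecDepth 4096 in
lemma core_eq (fallback : String) (code key : Int)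
    (h0 : 0 ≤ code) (h1 : code ≤ 26) (h2 : -3 ≤ key) (h3 : key ≤ 2) :
    base3ACore fallback code key = base3BCore code key := by
  interval_cases code <;> interval_cases key <;> rfl

lemma upper_singleton (c : Char) :
    PySem.Chars.upper [c] = [PySem.Chars.upperChar c] := rfl

set_option maxRecDepth 8192 in
theorem pre_witness_holds :
    Dom_base3_cipher pvWitness_base3_cipher.1 pvWitness_base3_cipher.2 ∧
    Pre_base3_cipher pvWitness_base3_cipher.1 pvWitness_base3_cipher.2 := by decide

-- ===== VERDICT (by name: the statement is the Claim_ definition above) =====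
theorem base3_cipher_spec : Claim_equal_base3_cipher := by
  intro letter key _ hpre
  obtain ⟨hlen, hkey⟩ := hpre
  obtain ⟨c, hc⟩ := List.length_eq_one_iff.mp hlen
  unfold Spec_base3_cipher base3_cipher base3_cipher_alt
  rw [hc, upper_singleton]
  simp only [List.length_cons, List.length_nil, if_pos, List.headD_cons]
  by_cases hg : ((PySem.Chars.upperChar c).toNat : Int) - 65 < 0 ∨
      ((PySem.Chars.upperChar c).toNat : Int) - 65 > 26
  · simp only [hg, if_pos]
  · simp only [hg, if_neg, not_false_eq_true]
    have hhit : pvLetterHit letter = true := by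
      unfold pvLetterHit
      rw [hc]
      simp only [List.any_cons, List.any_nil, Bool.or_false, Bool.and_eq_true, decide_eq_true_eq]
      omega
    have hk := hkey hhit
    exact core_eq letter _ key (by omega) (by omega) hk.1 hk.2

set_option maxRecDepth 8192 in
def base3_cipher_raises : Claim_raises_base3_cipher := by
  unfold Claim_raises_base3_cipher
  refine ⟨?_, by decide⟩
  rintro letter key _ ⟨hlen, hhit, hk⟩ ⟨_, himp⟩
  have := himp hhit
  omega
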